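-- pv_equiv track=rewrite | github.com/hchiam/cogLang-geneticAlgo | geneticAlgo_just1.py | penalize_ConsonantClusters
-- ===== SOURCE A (Python) =====
-- def penalize_ConsonantClusters(word):
--     score = 0
--     consonantClusterLength = 0
--     for letter in word:
--         if letter not in 'aeiou':
--             consonantClusterLength += 1
--         else:
--             if consonantClusterLength > 2: # CC is ok (esp. from src words and may favour shorter words)
--                 score -= consonantClusterLength
--             consonantClusterLength = 0
--     # in case the word ends with a consonant:
--     score -= consonantClusterLength
--     return score
-- ===== SOURCE B (Python) =====
-- def penalize_ConsonantClusters(word):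
--     # Pass 1: run-length-encode the word into (is_consonant, length) runs.
--     runs = []
--     for c in word:
--         k = c not in 'aeiou'
--         if runs and runs[-1][0] == k:
--             runs[-1][1] += 1
--         else:
--             runs.append([k, 1])
--     # Pass 2: every consonant run longer than 2 is penalized; a trailing
--     # consonant run of length <= 2 (not already counted) is penalized too.
--     score = -sum(n for k, n in runs if k and n > 2)
--     if runs and runs[-1][0] and runs[-1][1] <= 2:
--         score -= runs[-1][1]
--     return score
-- ===== Notes on version B (the rewrite author's own statement) =====
-- stated objective: alternative
-- what changed: B first run-length-encodes the word into (is_consonant, length) runs, then scores the run list: sum of consonant runs longer than 2 plus a trailing short consonant run, instead of A's single stateful loop with a counter and an end-of-word fixup.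
import Mathlib
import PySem

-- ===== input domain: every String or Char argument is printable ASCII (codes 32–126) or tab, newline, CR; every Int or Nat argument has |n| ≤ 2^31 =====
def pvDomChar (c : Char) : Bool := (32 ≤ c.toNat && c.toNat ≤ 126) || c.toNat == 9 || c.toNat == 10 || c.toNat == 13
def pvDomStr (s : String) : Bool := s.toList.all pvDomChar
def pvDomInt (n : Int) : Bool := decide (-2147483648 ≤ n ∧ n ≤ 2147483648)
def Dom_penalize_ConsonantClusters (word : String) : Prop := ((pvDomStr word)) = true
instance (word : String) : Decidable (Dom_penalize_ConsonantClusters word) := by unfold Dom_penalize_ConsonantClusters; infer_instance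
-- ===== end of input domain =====

-- B re-implements A by run-length-encoding the word into (is_consonant, length)
-- runs and scoring that run list; A is a single stateful loop. Same value everywhere.

-- ===== PORT A =====
-- `letter not in 'aeiou'`
def pvNotVowel (c : Char) : Bool := !(('a' :: 'e' :: 'i' :: 'o' :: 'u' :: []).contains c)

-- the for-loop of A, carrying (score, consonantClusterLength); after the loop A
-- returns score - consonantClusterLength
def pvLoopA : List Char → Int → Int → Int
  | [], score, ccl => score - ccl
  | c :: rest, score, ccl =>
    if pvNotVowel c then
      pvLoopA rest score (ccl + 1)
    else
      pvLoopA rest (if ccl > 2 then score - ccl else score) 0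

def penalize_ConsonantClusters (word : String) : Int :=
  pvLoopA word.toList 0 0

-- ===== PORT B =====
-- one step of B's pass-1 loop; the Python appends/updates at the right end of
-- `runs`, the port keeps the list reversed (head = last run) and reverses once
-- at the end — the same list is built by the same comparisons
def pvRunStep (runs : List (Bool × Int)) (c : Char) : List (Bool × Int) :=
  let k := pvNotVowel c
  match runs with
  | (k', m) :: rest => if k' == k then (k', m + 1) :: rest else (k, 1) :: (k', m) :: rest
  | [] => [(k, 1)]

def penalize_ConsonantClusters_alt (word : String) : Int :=
  let runs := (word.toList.foldl pvRunStep []).reverse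
  -- score = -sum(n for k, n in runs if k and n > 2)
  let score : Int := -(((runs.filter (fun kn => kn.1 && decide (kn.2 > 2))).map (fun kn => kn.2)).sum)
  -- if runs and runs[-1][0] and runs[-1][1] <= 2: score -= runs[-1][1]
  match runs.getLast? with
  | some (k, n) => if k && decide (n ≤ 2) then score - n else score
  | none => score

-- ===== PRECONDITION & SPEC =====
def Spec_penalize_ConsonantClusters (word : String) (out : Int) : Prop := out = penalize_ConsonantClusters_alt word
instance (word : String) (out : Int) : Decidable (Spec_penalize_ConsonantClusters word out) := by unfold Spec_penalize_ConsonantClusters; infer_instance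

-- ===== CLAIM (what is proved, stated in full; the proofs are below) =====
def Claim_equal_penalize_ConsonantClusters : Prop := ∀ (word : String), Dom_penalize_ConsonantClusters word → Spec_penalize_ConsonantClusters word (penalize_ConsonantClusters word)

-- ===== LEMMAS AND PROOFS =====

-- reference scoring of a run list: non-last consonant runs count iff longer
-- than 2, the last run counts iff it is a consonant run
def pvScoreRuns : List (Bool × Int) → Int
  | [] => 0
  | [(k, n)] => if k then -n else 0
  | (k, n) :: r :: rs => (if k && decide (n > 2) then -n else 0) + pvScoreRuns (r :: rs)

-- B's pass-2 sum, and B's whole pass 2, as functions of the run list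
def pvBsum (rs : List (Bool × Int)) : Int :=
  -(((rs.filter (fun kn => kn.1 && decide (kn.2 > 2))).map (fun kn => kn.2)).sum)

def pvBscore (rs : List (Bool × Int)) : Int :=
  match rs.getLast? with
  | some (k, n) => if k && decide (n ≤ 2) then pvBsum rs - n else pvBsum rs
  | none => pvBsum rs

theorem pv_alt_def (word : String) :
    penalize_ConsonantClusters_alt word = pvBscore ((word.toList.foldl pvRunStep []).reverse) := rfl

theorem pvScoreRuns_cons_ne {k : Bool} {n : Int} {rs : List (Bool × Int)} (h : rs ≠ []) :
    pvScoreRuns ((k, n) :: rs) = (if k && decide (n > 2) then -n else 0) + pvScoreRuns rs := by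
  match rs with
  | [] => exact absurd rfl h
  | r :: rs => rfl

theorem pvLoopA_add (t : List Char) (s ccl : Int) :
    pvLoopA t s ccl = s + pvLoopA t 0 ccl := by
  induction t generalizing s ccl with
  | nil => simp only [pvLoopA]; ring
  | cons c t ih =>
    by_cases hc : pvNotVowel c = true
    · simp only [pvLoopA, hc, if_pos]
      rw [ih, ih 0]
    · have hc' : pvNotVowel c = false := by simpa using hc
      simp only [pvLoopA, hc', Bool.false_eq_true, if_false]
      by_cases h2 : ccl > 2
      · rw [if_pos h2, if_pos h2, ih, ih (0 - ccl)]; ring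
      · rw [if_neg h2, if_neg h2, ih]

theorem pvRunStep_ne_nil (runs : List (Bool × Int)) (c : Char) : pvRunStep runs c ≠ [] := by
  match runs with
  | [] => simp [pvRunStep]
  | (k', m) :: rest => simp only [pvRunStep]; split <;> simp

theorem pvFoldl_ne_nil (t : List Char) (acc : List (Bool × Int)) (h : acc ≠ []) :
    List.foldl pvRunStep acc t ≠ [] := by
  induction t generalizing acc with
  | nil => simpa
  | cons c t ih => exact ih _ (pvRunStep_ne_nil acc c)

theorem pvRunStep_append (acc1 acc : List (Bool × Int)) (c : Char) (h : acc1 ≠ []) :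
    pvRunStep (acc1 ++ acc) c = pvRunStep acc1 c ++ acc := by
  match acc1 with
  | [] => exact absurd rfl h
  | (k', m) :: rest => simp only [pvRunStep, List.cons_append]; split <;> simp

theorem pvFoldl_append (t : List Char) (acc1 acc : List (Bool × Int)) (h : acc1 ≠ []) :
    List.foldl pvRunStep (acc1 ++ acc) t = List.foldl pvRunStep acc1 t ++ acc := by
  induction t generalizing acc1 with
  | nil => rfl
  | cons c t ih =>
    simp only [List.foldl_cons, pvRunStep_append acc1 acc c h]
    exact ih _ (pvRunStep_ne_nil acc1 c)

theorem pvScoreRuns_false_head (m : Int) (rs : List (Bool × Int)) :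
    pvScoreRuns ((false, m) :: rs) = pvScoreRuns rs := by
  match rs with
  | [] => simp [pvScoreRuns]
  | r :: rs => simp [pvScoreRuns]

-- the main invariant: A's loop over the suffix t, with current cluster length
-- matching the reversed accumulator's head run (k, n), computes the reference
-- score of the final run list
theorem pvLoopA_eq_scoreRuns (t : List Char) (k : Bool) (n : Int) :
    pvLoopA t 0 (if k then n else 0) = pvScoreRuns ((List.foldl pvRunStep [(k, n)] t).reverse) := by
  induction t generalizing k n with
  | nil =>
    cases k <;> simp [pvLoopA, pvScoreRuns]
  | cons c t ih =>
    by_cases hc : pvNotVowel c = true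
    · cases k with
      | true =>
        have hstep : pvRunStep [(true, n)] c = [(true, n + 1)] := by
          simp [pvRunStep, hc]
        have h := ih true (n + 1)
        simp only [pvLoopA, hc, if_pos, List.foldl_cons, hstep]
        simpa using h
      | false =>
        have hstep : pvRunStep [(false, n)] c = [(true, 1), (false, n)] := by
          simp [pvRunStep, hc]
        simp only [pvLoopA, hc, if_pos, List.foldl_cons, hstep]
        have hsplit := pvFoldl_append t [(true, 1)] [(false, n)] (by simp)
        rw [show ([(true, 1), (false, n)] : List (Bool × Int)) = [(true, 1)] ++ [(false, n)] from rfl,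
          hsplit, List.reverse_append]
        simp only [List.reverse_singleton, List.singleton_append, pvScoreRuns_false_head]
        have h := ih true 1
        simpa using h
    · have hc' : pvNotVowel c = false := by simpa using hc
      cases k with
      | true =>
        have hstep : pvRunStep [(true, n)] c = [(false, 1), (true, n)] := by
          simp [pvRunStep, hc']
        simp only [pvLoopA, hc', Bool.false_eq_true, if_false, List.foldl_cons, hstep]
        have hsplit := pvFoldl_append t [(false, 1)] [(true, n)] (by simp)
        rw [show ([(false, 1), (true, n)] : List (Bool × Int)) = [(false, 1)] ++ [(true, n)] from rfl,
          hsplit, List.reverse_append]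
        simp only [List.reverse_singleton, List.singleton_append]
        rw [pvScoreRuns_cons_ne (by
          have hne := pvFoldl_ne_nil t [(false, 1)] (by simp)
          simpa using hne)]
        have hb := ih false 1
        simp only [Bool.false_eq_true, if_false] at hb
        simp only [if_true]
        by_cases h2 : n > 2
        · rw [if_pos h2, pvLoopA_add, hb]; simp [h2]
        · rw [if_neg h2, hb]; simp [h2]
      | false =>
        have hstep : pvRunStep [(false, n)] c = [(false, n + 1)] := by
          simp [pvRunStep, hc']
        have h := ih false (n + 1)
        simp only [pvLoopA, hc', Bool.false_eq_true, if_false, List.foldl_cons, hstep] at *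
        simpa using h

theorem pvBsum_cons (k : Bool) (n : Int) (rest : List (Bool × Int)) :
    pvBsum ((k, n) :: rest) = (if k && decide (n > 2) then -n else 0) + pvBsum rest := by
  simp only [pvBsum, List.filter_cons]
  split_ifs with h <;> (simp_all; try ring)

-- B's two-pass scoring of a run list equals the reference scoring
theorem pvBscore_eq (rs : List (Bool × Int)) : pvBscore rs = pvScoreRuns rs := by
  match rs with
  | [] => simp [pvBscore, pvBsum, pvScoreRuns]
  | [(k, n)] =>
    cases k <;> by_cases h2 : (2 : Int) < n <;>
      simp [pvBscore, pvBsum, pvScoreRuns, h2]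
  | (k, n) :: r :: rs =>
    have ih := pvBscore_eq (r :: rs)
    have hne : (r :: rs) ≠ ([] : List (Bool × Int)) := by simp
    obtain ⟨⟨k', n'⟩, h⟩ := Option.isSome_iff_exists.mp (List.getLast?_isSome.mpr hne)
    rw [pvScoreRuns_cons_ne hne, ← ih]
    simp only [pvBscore, List.getLast?_cons_cons, h, pvBsum_cons]
    split_ifs <;> ring

theorem pv_main (word : String) :
    penalize_ConsonantClusters word = penalize_ConsonantClusters_alt word := by
  rw [pv_alt_def, pvBscore_eq]
  unfold penalize_ConsonantClusters
  match hw : word.toList with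
  | [] => simp [pvLoopA, pvScoreRuns]
  | c :: t =>
    by_cases hc : pvNotVowel c = true
    · have hstep : pvRunStep [] c = [(true, 1)] := by simp [pvRunStep, hc]
      have h := pvLoopA_eq_scoreRuns t true 1
      simp only [pvLoopA, hc, if_pos, List.foldl_cons, hstep]
      simpa using h
    · have hc' : pvNotVowel c = false := by simpa using hc
      have hstep : pvRunStep [] c = [(false, 1)] := by simp [pvRunStep, hc']
      have h := pvLoopA_eq_scoreRuns t false 1
      simp only [pvLoopA, hc', Bool.false_eq_true, if_false, List.foldl_cons, hstep]
      rw [if_neg (by omega : ¬ (0 : Int) > 2)]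
      simpa using h

-- ===== VERDICT (by name: the statement is the Claim_ definition above) =====
theorem penalize_ConsonantClusters_spec : Claim_equal_penalize_ConsonantClusters := by
  intro word _
  unfold Spec_penalize_ConsonantClusters
  exact pv_main word
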